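-- pv_equiv track=rewrite | github.com/stevste/Projet-S4 | Solver3D.py | GetCornerPermCoord
-- ===== SOURCE A (Python) =====
-- import math
--
-- def ComparePiece(p1, p2):
--     for i in p2:
--         if i not in p1:
--             return False
--     return True
--
-- def GetCornerPermCoord(pieceList, ref):
--     coord = 0
--     perm = []
--
--     for i in pieceList:
--         j=0
--         while not ComparePiece(i, ref[j]):
--             j += 1
--         perm.append(j)
--
--     for i in range(1, len(perm)):
--         k = 0
--         for j in range(0, i):
--             if perm[j] >= perm[i]:
--                 k += 1
--         coord += k*math.factorial(i)
--
--     return coord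
-- ===== SOURCE B (Python) =====
-- def GetCornerPermCoord(pieceList, ref):
--     # Match each piece against ref using precomputed sets (subset test),
--     # then accumulate the coordinate with a bucket-count array, a suffix sum
--     # and a running factorial instead of a nested scan per position.
--     refSets = [set(r) for r in ref]
--     perm = [next(j for j, rs in enumerate(refSets) if rs <= set(p))
--             for p in pieceList]
--     cnt = [0] * len(ref)
--     coord = 0
--     fact = 1
--     for i, v in enumerate(perm):
--         if i:
--             fact *= i
--             coord += sum(cnt[v:]) * fact
--         cnt[v] += 1
--     return coord
-- ===== Notes on version B (the rewrite author's own statement) =====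
-- stated objective: alternative
-- what changed: B matches pieces against precomputed reference sets instead of repeated list-membership scans, and replaces the per-position nested scan with recomputed factorials by a single pass over a bucket-count array with suffix sums and a running factorial.
import Mathlib
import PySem

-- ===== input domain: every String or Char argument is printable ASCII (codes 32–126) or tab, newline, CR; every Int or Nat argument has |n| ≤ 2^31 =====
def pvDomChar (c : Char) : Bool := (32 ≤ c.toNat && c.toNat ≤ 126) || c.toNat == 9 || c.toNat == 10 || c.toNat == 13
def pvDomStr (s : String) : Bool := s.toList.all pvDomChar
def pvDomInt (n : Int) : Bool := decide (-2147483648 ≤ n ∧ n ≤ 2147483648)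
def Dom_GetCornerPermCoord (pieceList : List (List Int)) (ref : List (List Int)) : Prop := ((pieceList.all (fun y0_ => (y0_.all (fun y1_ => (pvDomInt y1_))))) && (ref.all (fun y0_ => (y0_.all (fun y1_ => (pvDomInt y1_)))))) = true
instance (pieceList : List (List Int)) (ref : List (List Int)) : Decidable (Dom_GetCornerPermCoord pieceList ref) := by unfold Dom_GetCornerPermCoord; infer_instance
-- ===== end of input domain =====

-- B replaces the per-position nested scan and factorial recomputation by a bucket-count
-- array with suffix sums and a running factorial, and matches pieces via precomputed sets.

-- ===== PORT A =====
-- for i in p2: if i not in p1: return False / return True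
def pvComparePiece (p1 p2 : List Int) : Bool :=
  p2.all (fun i => p1.contains i)

-- the 'while not ComparePiece(i, ref[j]): j += 1' scan; when ref is exhausted Python
-- raises IndexError (excluded by Pre_), here we return the sentinel j past the end
def pvFindJ (i : List Int) : List (List Int) → Nat → Nat
  | [], j => j
  | r :: rs, j => if pvComparePiece i r then j else pvFindJ i rs (j + 1)

-- the second loop of A, as a function of the perm list it has built
def pvCoordA (perm : List Nat) : Int :=
  (PySem.List.pyRange 1 (perm.length : Int) 1).foldl
    (fun coord i =>
      let k := (PySem.List.pyRange 0 i 1).foldl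
        (fun k j => if PySem.List.pyGetD perm i 0 ≤ PySem.List.pyGetD perm j 0 then k + 1 else k)
        (0 : Int)
      coord + k * (Nat.factorial i.toNat : Int)) 0

def GetCornerPermCoord (pieceList : List (List Int)) (ref : List (List Int)) : Int :=
  pvCoordA (pieceList.map (fun i => pvFindJ i ref 0))

-- ===== PORT B =====
-- next(j for j, rs in enumerate(refSets) if rs <= s); StopIteration (no match) is
-- excluded by Pre_, here we return the sentinel j past the end
def pvFindMatch (s : PySem.Set Int) : List (PySem.Set Int) → Nat → Nat
  | [], j => j
  | rs :: rest, j => if PySem.Set.issubset rs s then j else pvFindMatch s rest (j + 1)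

-- B's single pass: cnt is the bucket-count array, fact the running factorial;
-- cnt[v:] with v ≥ 0 is cnt.drop v, and cnt[v] += 1 is set/getD (v < len(cnt) under Pre_)
def pvPhase2 : List Nat → List Int → Nat → Int → Int → Int
  | [], _, _, _, coord => coord
  | v :: rest, cnt, i, fact, coord =>
    if i = 0 then
      pvPhase2 rest (cnt.set v (cnt.getD v 0 + 1)) (i + 1) fact coord
    else
      let fact' := fact * (i : Int)
      let coord' := coord + (cnt.drop v).sum * fact'
      pvPhase2 rest (cnt.set v (cnt.getD v 0 + 1)) (i + 1) fact' coord'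

def GetCornerPermCoord_alt (pieceList : List (List Int)) (ref : List (List Int)) : Int :=
  let refSets := ref.map (fun r => PySem.Set.ofList r)
  let perm := pieceList.map (fun p => pvFindMatch (PySem.Set.ofList p) refSets 0)
  pvPhase2 perm (List.replicate ref.length 0) 0 1 0

-- ===== PRECONDITION & SPEC =====
-- Pre_ excludes exactly the inputs where A raises IndexError (and B StopIteration):
-- some piece matches no reference piece.
def Pre_GetCornerPermCoord (pieceList : List (List Int)) (ref : List (List Int)) : Prop :=
  ∀ p ∈ pieceList, ∃ r ∈ ref, ∀ x ∈ r, x ∈ p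
instance (pieceList : List (List Int)) (ref : List (List Int)) : Decidable (Pre_GetCornerPermCoord pieceList ref) := by unfold Pre_GetCornerPermCoord; infer_instance

def pvWitness_GetCornerPermCoord : List (List Int) × List (List Int) :=
  ([[3, 4], [1, 2]], [[2, 1], [4, 3]])

def Spec_GetCornerPermCoord (pieceList : List (List Int)) (ref : List (List Int)) (out : Int) : Prop := out = GetCornerPermCoord_alt pieceList ref
instance (pieceList : List (List Int)) (ref : List (List Int)) (out : Int) : Decidable (Spec_GetCornerPermCoord pieceList ref out) := by unfold Spec_GetCornerPermCoord; infer_instance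

-- ===== CLAIM (what is proved, stated in full; the proofs are below) =====
def Claim_equal_GetCornerPermCoord : Prop := ∀ (pieceList : List (List Int)) (ref : List (List Int)), Dom_GetCornerPermCoord pieceList ref → Pre_GetCornerPermCoord pieceList ref → Spec_GetCornerPermCoord pieceList ref (GetCornerPermCoord pieceList ref)

-- ===== LEMMAS AND PROOFS =====

-- the common mathematical shape both ports compute: Lehmer digits accumulated left to right
def lehmerTerm (pre : List Nat) (v : Nat) : Int :=
  if pre.length = 0 then 0
  else (pre.countP (fun x => decide (v ≤ x)) : Int) * (Nat.factorial pre.length : Int)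

def lehmer : List Nat → List Nat → Int
  | _, [] => 0
  | pre, v :: rest => lehmerTerm pre v + lehmer (pre ++ [v]) rest

-- B's bucket-count array as a function of the processed prefix
def countsList (pre : List Nat) (m : Nat) : List Int :=
  (List.range m).map (fun q => (pre.count q : Int))

theorem subset_eq_compare (p r : List Int) :
    PySem.Set.issubset (PySem.Set.ofList r) (PySem.Set.ofList p) = pvComparePiece p r := by
  apply Bool.eq_iff_iff.mpr
  simp [PySem.Set.issubset, pvComparePiece, List.all_eq_true, PySem.Set.contains,
    PySem.Set.mem_ofList]

theorem findMatch_eq_findJ (p : List Int) (rs : List (List Int)) (j : Nat) :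
    pvFindMatch (PySem.Set.ofList p) (rs.map (fun r => PySem.Set.ofList r)) j = pvFindJ p rs j := by
  induction rs generalizing j with
  | nil => rfl
  | cons r rest ih =>
    simp only [List.map_cons, pvFindMatch, pvFindJ, subset_eq_compare, ih]

theorem findJ_lt (p : List Int) (rs : List (List Int)) (j : Nat)
    (h : ∃ r ∈ rs, pvComparePiece p r = true) : pvFindJ p rs j < j + rs.length := by
  induction rs generalizing j with
  | nil => simp at h
  | cons r rest ih =>
    simp only [pvFindJ]
    by_cases hc : pvComparePiece p r = true
    · simp [hc]
    · simp only [hc]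
      rcases h with ⟨r', hr', hcmp⟩
      rcases List.mem_cons.mp hr' with h1 | h2
      · exact absurd (h1 ▸ hcmp) hc
      · have := ih (j + 1) ⟨r', h2, hcmp⟩
        simpa [Nat.add_assoc, Nat.add_comm 1] using this

theorem coordA_append (perm : List Nat) (v : Nat) :
    pvCoordA (perm ++ [v]) = pvCoordA perm + lehmerTerm perm v := by
  by_cases h0 : perm.length = 0
  · rw [List.length_eq_zero_iff.mp h0]
    simp [pvCoordA, lehmerTerm, PySem.List.pyRange_one_eq_nil]
  · have hget : ∀ (i : Int), 0 ≤ i → i < (perm.length : Int) →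
        PySem.List.pyGetD (perm ++ [v]) i 0 = PySem.List.pyGetD perm i 0 := by
      intro i hi1 hi2
      rw [PySem.List.pyGetD_of_nonneg _ _ hi1, PySem.List.pyGetD_of_nonneg _ _ hi1,
        List.getD_append _ _ _ _ (by omega)]
    have hlen : ((perm ++ [v]).length : Int) = (perm.length : Int) + 1 := by simp
    rw [pvCoordA, hlen,
      PySem.List.pyRange_one_succ_right (by omega : (1:Int) ≤ (perm.length : Int)),
      List.foldl_concat]
    have hmain : (PySem.List.pyRange 1 (perm.length : Int)).foldl
        (fun coord i =>
          let k := (PySem.List.pyRange 0 i 1).foldl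
            (fun k j => if PySem.List.pyGetD (perm ++ [v]) i 0 ≤ PySem.List.pyGetD (perm ++ [v]) j 0 then k + 1 else k)
            (0 : Int)
          coord + k * (Nat.factorial i.toNat : Int)) 0 = pvCoordA perm := by
      rw [pvCoordA]
      apply PySem.List.foldl_congr_mem
      intro acc i hi
      rw [PySem.List.mem_pyRange_one] at hi
      show acc + ((PySem.List.pyRange 0 i).foldl
          (fun k j => if PySem.List.pyGetD (perm ++ [v]) i 0 ≤ PySem.List.pyGetD (perm ++ [v]) j 0 then k + 1 else k) 0) * (Nat.factorial i.toNat : Int)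
        = acc + ((PySem.List.pyRange 0 i).foldl
          (fun k j => if PySem.List.pyGetD perm i 0 ≤ PySem.List.pyGetD perm j 0 then k + 1 else k) 0) * (Nat.factorial i.toNat : Int)
      congr 2
      apply PySem.List.foldl_congr_mem
      intro k j hj
      rw [PySem.List.mem_pyRange_one] at hj
      rw [hget i (by omega) hi.2, hget j hj.1 (by omega)]
    rw [hmain]
    show pvCoordA perm + ((PySem.List.pyRange 0 (perm.length : Int)).foldl
        (fun k j => if PySem.List.pyGetD (perm ++ [v]) (perm.length : Int) 0 ≤ PySem.List.pyGetD (perm ++ [v]) j 0 then k + 1 else k) 0) * (Nat.factorial ((perm.length : Int)).toNat : Int)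
      = pvCoordA perm + lehmerTerm perm v
    have hv : PySem.List.pyGetD (perm ++ [v]) (perm.length : Int) 0 = v := by
      rw [PySem.List.pyGetD_of_nonneg _ _ (by omega)]
      simp
    rw [hv]
    have hcnt := PySem.List.foldl_count_if
      (fun j => decide (v ≤ PySem.List.pyGetD (perm ++ [v]) j 0))
      (PySem.List.pyRange 0 (perm.length : Int)) 0
    simp only [decide_eq_true_eq] at hcnt
    rw [hcnt, zero_add]
    have hcongr : List.countP (fun j => decide (v ≤ PySem.List.pyGetD (perm ++ [v]) j 0))
        (PySem.List.pyRange 0 (perm.length : Int))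
        = List.countP (fun j => decide (v ≤ PySem.List.pyGetD perm j 0))
          (PySem.List.pyRange 0 (perm.length : Int)) := by
      apply List.countP_congr
      intro j hj
      rw [PySem.List.mem_pyRange_one] at hj
      rw [hget j hj.1 hj.2]
    have hperm : List.countP (fun j => decide (v ≤ PySem.List.pyGetD perm j 0))
        (PySem.List.pyRange 0 (perm.length : Int))
        = perm.countP (fun x => decide (v ≤ x)) := by
      conv_rhs => rw [← PySem.List.map_pyGetD_pyRange_zero' perm 0]
      rw [List.countP_map]
      rfl
    rw [hcongr, hperm, lehmerTerm, if_neg h0]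
    simp

theorem lehmer_append (rest : List Nat) (pre : List Nat) (v : Nat) :
    lehmer pre (rest ++ [v]) = lehmer pre rest + lehmerTerm (pre ++ rest) v := by
  induction rest generalizing pre with
  | nil => simp [lehmer]
  | cons w tl ih =>
    rw [List.cons_append, lehmer, lehmer, ih (pre ++ [w]), List.append_assoc,
      List.singleton_append]
    ring

theorem coordA_eq_lehmer (perm : List Nat) : pvCoordA perm = lehmer [] perm := by
  induction perm using List.reverseRecOn with
  | nil => rfl
  | append_singleton xs x ih =>
    rw [coordA_append, ih, lehmer_append, List.nil_append]

theorem drop_range_aux (v m : Nat) : (List.range m).drop v = List.range' v (m - v) := by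
  rw [List.range_eq_range', List.drop_range']; simp

theorem counts_drop_sum (pre : List Nat) (m v : Nat) (hv : v < m)
    (hpre : ∀ x ∈ pre, x < m) :
    ((countsList pre m).drop v).sum = (pre.countP (fun x => decide (v ≤ x)) : Int) := by
  rw [countsList, ← List.map_drop, drop_range_aux]
  induction pre with
  | nil => simp
  | cons x tl ih =>
    have hx : x < m := hpre x (List.mem_cons_self)
    have htl : ∀ y ∈ tl, y < m := fun y hy => hpre y (List.mem_cons_of_mem _ hy)
    rw [List.countP_cons]
    simp only [List.count_cons]
    push_cast
    rw [PySem.List.sum_map_add_int, ih htl]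
    have hs := PySem.List.sum_map_ite_one_zero (fun q => x == q) (List.range' v (m - v))
    have hflip : List.countP (fun q => x == q) (List.range' v (m - v))
        = List.countP (fun q => q == x) (List.range' v (m - v)) := by
      apply List.countP_congr
      intro q _
      simp only [beq_iff_eq]
      exact eq_comm
    rw [hs, hflip, ← List.count_eq_countP]
    by_cases h : v ≤ x
    · have hmem : x ∈ List.range' v (m - v) := by
        simp [List.mem_range'_1]; omega
      rw [List.count_eq_one_of_mem (List.nodup_range' _) hmem]
      simp [h]
    · have hmem : x ∉ List.range' v (m - v) := by
        simp [List.mem_range'_1]; omega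
      rw [List.count_eq_zero_of_not_mem hmem]
      simp [h]

theorem counts_set (pre : List Nat) (m v : Nat) (hv : v < m) :
    (countsList pre m).set v ((countsList pre m).getD v 0 + 1) = countsList (pre ++ [v]) m := by
  have hgetD : (countsList pre m).getD v 0 = (pre.count v : Int) := by
    rw [List.getD_eq_getElem _ _ (by simp [countsList]; omega)]
    simp [countsList]
  rw [hgetD]
  apply List.ext_getElem
  · simp [countsList]
  · intro i h1 h2
    have him : i < m := by simpa [countsList] using h2
    rw [List.getElem_set]
    simp only [countsList, List.getElem_map, List.getElem_range]
    split
    · next h => subst h; simp [List.count_append]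
    · next h =>
      simp [List.count_append, List.count_singleton]
      intro hvi
      omega

theorem phase2_eq_lehmer (rest : List Nat) (pre : List Nat) (m : Nat) (coord : Int)
    (hpre : ∀ x ∈ pre, x < m) (hrest : ∀ x ∈ rest, x < m) :
    pvPhase2 rest (countsList pre m) pre.length (Nat.factorial (pre.length - 1) : Int) coord
      = coord + lehmer pre rest := by
  induction rest generalizing pre coord with
  | nil => simp [pvPhase2, lehmer]
  | cons v tl ih =>
    have hv : v < m := hrest v List.mem_cons_self
    have htl : ∀ x ∈ tl, x < m := fun x hx => hrest x (List.mem_cons_of_mem _ hx)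
    by_cases h0 : pre.length = 0
    · obtain rfl := List.length_eq_zero_iff.mp h0
      rw [pvPhase2, if_pos (by simp : ([] : List Nat).length = 0), counts_set [] m v hv]
      have hih := ih ([v]) coord (by intro x hx; simp at hx; omega) htl
      norm_num at hih ⊢
      rw [hih, lehmer, lehmerTerm]
      simp
    · rw [pvPhase2, if_neg h0]
      have hfact : (Nat.factorial (pre.length - 1) : Int) * (pre.length : Int)
          = (Nat.factorial pre.length : Int) := by
        have := Nat.mul_factorial_pred (n := pre.length) (by omega)
        push_cast [← this]
        ring
      simp only [hfact, counts_set pre m v hv,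
        counts_drop_sum pre m v hv hpre]
      have hih := ih (pre ++ [v]) (coord + (pre.countP (fun x => decide (v ≤ x)) : Int) * (Nat.factorial pre.length : Int))
        (by intro x hx; rcases List.mem_append.mp hx with h | h
            · exact hpre x h
            · simp at h; omega)
      rw [List.length_append, List.length_singleton] at hih
      simp only [Nat.add_sub_cancel] at hih
      rw [hih htl, lehmer, lehmerTerm, if_neg h0]
      ring

-- ===== VERDICT (by name: the statement is the Claim_ definition above) =====
theorem GetCornerPermCoord_spec : Claim_equal_GetCornerPermCoord := by
  intro pieceList ref _ hpre
  unfold Spec_GetCornerPermCoord GetCornerPermCoord GetCornerPermCoord_alt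
  show pvCoordA (pieceList.map (fun i => pvFindJ i ref 0))
    = pvPhase2 (pieceList.map (fun p => pvFindMatch (PySem.Set.ofList p) (ref.map (fun r => PySem.Set.ofList r)) 0))
        (List.replicate ref.length 0) 0 1 0
  have hperm : pieceList.map (fun p => pvFindMatch (PySem.Set.ofList p) (ref.map (fun r => PySem.Set.ofList r)) 0)
      = pieceList.map (fun i => pvFindJ i ref 0) := by
    apply List.map_congr_left
    intro p _
    exact findMatch_eq_findJ p ref 0
  rw [hperm]
  have hbound : ∀ x ∈ pieceList.map (fun i => pvFindJ i ref 0), x < ref.length := by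
    intro x hx
    rcases List.mem_map.mp hx with ⟨p, hp, rfl⟩
    rcases hpre p hp with ⟨r, hr, hsub⟩
    have hc : pvComparePiece p r = true := by
      simp only [pvComparePiece, List.all_eq_true]
      intro x hxr
      simpa using hsub x hxr
    simpa using findJ_lt p ref 0 ⟨r, hr, hc⟩
  have hrepl : (List.replicate ref.length (0:Int)) = countsList [] ref.length := by
    simp [countsList]
  rw [hrepl, coordA_eq_lehmer]
  have h := phase2_eq_lehmer (pieceList.map (fun i => pvFindJ i ref 0)) [] ref.length 0
    (by simp) hbound
  norm_num at h
  exact h.symm
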